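-- pv_equiv track=rewrite | github.com/ponson/CodeWar | 7kyuFilterUnusedDigits.py | unused_digits_v1
-- ===== SOURCE A (Python) =====
-- def unused_digits_v1(*args):
--     digits=[0, 1, 2, 3, 4, 5, 6, 7, 8, 9]
--     for num in args:
--         for i in range(10):
--             if str(i) in str(num) and i in digits:
--                 digits.remove(i)
--
--     result = ""
--     for x in digits:
--         result += str(x)
--
--     return result
-- ===== SOURCE B (Python) =====
-- def unused_digits_v1(*args):
--     seen = set()
--     for num in args:
--         for ch in str(num):
--             if ch in '0123456789':
--                 seen.add(ch)
--     return ''.join(d for d in '0123456789' if d not in seen)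
-- ===== Notes on version B (the rewrite author's own statement) =====
-- stated objective: simpler
-- what changed: B scans the characters of each str(num) once, collecting occurring digit characters in a set, then emits '0123456789' filtered by that set, instead of A's per-argument loop over all ten digits doing a substring test and a list remove for each.
import Mathlib
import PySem

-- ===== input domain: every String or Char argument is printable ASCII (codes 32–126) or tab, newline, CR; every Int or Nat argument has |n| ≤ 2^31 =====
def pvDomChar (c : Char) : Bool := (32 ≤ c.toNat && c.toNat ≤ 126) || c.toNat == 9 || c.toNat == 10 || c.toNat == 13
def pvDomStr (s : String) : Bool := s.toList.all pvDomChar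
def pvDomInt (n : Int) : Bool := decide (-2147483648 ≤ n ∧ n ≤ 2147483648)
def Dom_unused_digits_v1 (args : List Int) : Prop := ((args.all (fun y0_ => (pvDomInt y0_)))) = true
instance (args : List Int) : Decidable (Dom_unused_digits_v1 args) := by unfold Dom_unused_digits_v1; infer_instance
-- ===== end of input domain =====

-- B replaces A's per-argument loop over all ten digits (substring test + list remove each) by one
-- scan of the characters of each str(num) collecting occurring digit characters in a set, then a
-- single filter of '0123456789'; objective: simpler.

-- ===== PORT A =====
def unused_digits_v1 (args : List Int) : String :=
  (args.foldl (fun digits num =>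
      (PySem.List.pyRange 0 10 1).foldl (fun digits i =>
        if PySem.Str.isIn (PySem.Int.toStr i) (PySem.Int.toStr num) ∧ i ∈ digits
        then digits.erase i else digits) digits)
    ([0, 1, 2, 3, 4, 5, 6, 7, 8, 9] : List Int)).foldl
      (fun result x => result ++ PySem.Int.toStr x) ""

-- ===== PORT B =====
def unused_digits_v1_alt (args : List Int) : String :=
  String.ofList ("0123456789".toList.filter (fun d =>
    !(PySem.Set.contains
        (args.foldl (fun seen num =>
            (PySem.Int.toStr num).toList.foldl (fun seen ch =>
              if PySem.Chars.isIn [ch] "0123456789".toList then PySem.Set.add seen ch else seen)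
              seen)
          PySem.Set.empty)
        d)))

-- ===== PRECONDITION & SPEC =====
def Spec_unused_digits_v1 (args : List Int) (out : String) : Prop := out = unused_digits_v1_alt args
instance (args : List Int) (out : String) : Decidable (Spec_unused_digits_v1 args out) := by unfold Spec_unused_digits_v1; infer_instance

-- ===== CLAIM (what is proved, stated in full; the proofs are below) =====
def Claim_equal_unused_digits_v1 : Prop := ∀ (args : List Int), Dom_unused_digits_v1 args → Spec_unused_digits_v1 args (unused_digits_v1 args)

-- ===== LEMMAS AND PROOFS =====

-- single-character substring test is membership
lemma isIn_singleton (c : Char) (l : List Char) : PySem.Chars.isIn [c] l = decide (c ∈ l) := by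
  by_cases h : c ∈ l
  · have ht : PySem.Chars.isIn [c] l = true := by
      rw [PySem.Chars.isIn_iff_infix]
      obtain ⟨s, t, rfl⟩ := List.append_of_mem h
      exact ⟨s, t, by simp⟩
    simp [ht, h]
  · have hf : PySem.Chars.isIn [c] l = false := by
      rw [PySem.Chars.isIn_eq_false_iff]
      exact fun hinf => h (hinf.mem (by simp))
    simp [hf, h]

-- A's inner loop (guarded remove over a nodup candidate list) is a filter
lemma inner_erase (P : Int → Bool) :
    ∀ (I d : List Int), d.Nodup →
      I.foldl (fun d i => if P i = true ∧ i ∈ d then d.erase i else d) d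
        = d.filter (fun x => !(P x && decide (x ∈ I))) := by
  intro I
  induction I with
  | nil => intro d _; simp
  | cons i I ih =>
    intro d hd
    have hstep : (if P i = true ∧ i ∈ d then d.erase i else d)
        = d.filter (fun x => !(P i && decide (x = i))) := by
      by_cases hP : P i = true
      · by_cases hm : i ∈ d
        · simp only [hP, hm, and_self, if_true, true_and]
          rw [hd.erase_eq_filter]
          exact List.filter_congr (fun x _ => by by_cases hx : x = i <;> simp [hx])
        · simp only [hP, hm, and_false, if_false, true_and]
          refine (List.filter_eq_self.mpr (fun x hx => ?_)).symm
          have : x ≠ i := fun h => hm (h ▸ hx)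
          simp [this]
      · have hPf : P i = false := by revert hP; cases P i <;> simp
        simp only [hP, false_and, if_false]
        refine (List.filter_eq_self.mpr (fun x _ => ?_)).symm
        simp [hPf]
    rw [List.foldl_cons, hstep, ih _ (hd.filter _), List.filter_filter]
    refine List.filter_congr (fun x _ => ?_)
    by_cases hx : x = i
    · subst hx; cases hP : P x <;> simp [hP]
    · simp [hx]

-- A's whole candidate computation is one filter over the start list
lemma outer_fold (f : Int → Int → Bool) (I : List Int) :
    ∀ (nums d : List Int), d.Nodup →
      nums.foldl (fun d num =>
          I.foldl (fun d i => if f num i = true ∧ i ∈ d then d.erase i else d) d) d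
        = d.filter (fun x => nums.all (fun num => !(f num x && decide (x ∈ I)))) := by
  intro nums
  induction nums with
  | nil => intro d _; simp
  | cons num nums ih =>
    intro d hd
    rw [List.foldl_cons, inner_erase (f num) I d hd, ih _ (hd.filter _), List.filter_filter]
    exact List.filter_congr (fun x _ => by
      simp only [List.all_cons]; exact Bool.and_comm _ _)

-- membership in B's seen-set after scanning one argument
lemma mem_seen_inner (dl : List Char) (x : Char) :
    ∀ (cs : List Char) (s : PySem.Set Char),
      (x ∈ cs.foldl (fun s c => if PySem.Chars.isIn [c] dl then PySem.Set.add s c else s) s)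
        ↔ x ∈ s ∨ (x ∈ dl ∧ x ∈ cs) := by
  intro cs
  induction cs with
  | nil => intro s; simp
  | cons c cs ih =>
    intro s
    rw [List.foldl_cons, ih]
    by_cases hc : c ∈ dl
    · simp only [isIn_singleton, hc, decide_true, if_true, PySem.Set.mem_add]
      constructor
      · rintro ((h | rfl) | ⟨h1, h2⟩)
        · exact Or.inl h
        · exact Or.inr ⟨hc, by simp⟩
        · exact Or.inr ⟨h1, by simp [h2]⟩
      · rintro (h | ⟨h1, h2⟩)
        · exact Or.inl (Or.inl h)
        · rcases List.mem_cons.mp h2 with rfl | h2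
          · exact Or.inl (Or.inr rfl)
          · exact Or.inr ⟨h1, h2⟩
    · simp only [isIn_singleton, hc, decide_false, if_false]
      constructor
      · rintro (h | ⟨h1, h2⟩)
        · exact Or.inl h
        · exact Or.inr ⟨h1, by simp [h2]⟩
      · rintro (h | ⟨h1, h2⟩)
        · exact Or.inl h
        · rcases List.mem_cons.mp h2 with rfl | h2
          · exact absurd h1 hc
          · exact Or.inr ⟨h1, h2⟩

-- membership in B's seen-set after the whole scan
lemma mem_seen (dl : List Char) (x : Char) :
    ∀ (nums : List Int) (s : PySem.Set Char),
      (x ∈ nums.foldl (fun s num =>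
          (PySem.Int.toStr num).toList.foldl
            (fun s c => if PySem.Chars.isIn [c] dl then PySem.Set.add s c else s) s) s)
        ↔ x ∈ s ∨ (x ∈ dl ∧ nums.any (fun num => decide (x ∈ PySem.Int.toChars num))) := by
  intro nums
  induction nums with
  | nil => intro s; simp
  | cons num nums ih =>
    intro s
    rw [List.foldl_cons, ih, mem_seen_inner]
    simp only [List.any_cons]
    constructor
    · rintro ((h | ⟨h1, h2⟩) | ⟨h1, h2⟩)
      · exact Or.inl h
      · exact Or.inr ⟨h1, by rw [PySem.Int.toList_toStr] at h2; simp [h2]⟩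
      · exact Or.inr ⟨h1, by simp [h2]⟩
    · rintro (h | ⟨h1, h2⟩)
      · exact Or.inl (Or.inl h)
      · rw [Bool.or_eq_true] at h2
        rcases h2 with h2 | h2
        · exact Or.inl (Or.inr ⟨h1, by
            rw [PySem.Int.toList_toStr]; exact of_decide_eq_true h2⟩)
        · exact Or.inr ⟨h1, h2⟩

-- A's result-string loop, read on the character list
lemma toList_foldl_append :
    ∀ (L : List Int) (s : String),
      (L.foldl (fun r x => r ++ PySem.Int.toStr x) s).toList
        = s.toList ++ L.flatMap PySem.Int.toChars := by
  intro L
  induction L with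
  | nil => intro s; simp
  | cons x L ih => intro s; rw [List.foldl_cons, ih]; simp

-- flatMap of singleton-rendering digits is a map-filter
lemma flatMap_filter (f : Int → Char) (p : Char → Bool) :
    ∀ (L : List Int), (∀ i ∈ L, PySem.Int.toChars i = [f i]) →
      ((L.filter (fun i => p (f i))).flatMap PySem.Int.toChars)
        = (L.map f).filter p := by
  intro L
  induction L with
  | nil => intro _; simp
  | cons i L ih =>
    intro h
    have hi := h i (by simp)
    have hL := fun j hj => h j (List.mem_cons_of_mem _ hj)
    by_cases hp : p (f i) = true
    · simp [List.filter_cons, hp, hi, ih hL]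
    · simp [List.filter_cons, hp, ih hL]

-- all of negations is negation of any
lemma all_not_eq_not_any {α : Type} (l : List α) (f : α → Bool) :
    l.all (fun x => !f x) = !l.any f := by
  induction l with
  | nil => rfl
  | cons a l ih => simp [List.all_cons, List.any_cons, ih, Bool.not_or]

-- A's characters are '0123456789' filtered by non-occurrence
lemma A_chars (args : List Int) :
    (unused_digits_v1 args).toList
      = "0123456789".toList.filter
          (fun c => !(args.any (fun num => decide (c ∈ PySem.Int.toChars num)))) := by
  unfold unused_digits_v1
  rw [outer_fold (fun num i => PySem.Str.isIn (PySem.Int.toStr i) (PySem.Int.toStr num))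
      (PySem.List.pyRange 0 10 1) args [0,1,2,3,4,5,6,7,8,9] (by decide)]
  rw [toList_foldl_append]
  have hchar : ∀ i ∈ ([0,1,2,3,4,5,6,7,8,9] : List Int),
      PySem.Int.toChars i = [Char.ofNat (48 + i.toNat)] := by decide
  have hr : PySem.List.pyRange 0 10 1 = ([0,1,2,3,4,5,6,7,8,9] : List Int) := by decide
  have hApred : ∀ i ∈ ([0,1,2,3,4,5,6,7,8,9] : List Int),
      (args.all (fun num => !(PySem.Str.isIn (PySem.Int.toStr i) (PySem.Int.toStr num)
          && decide (i ∈ PySem.List.pyRange 0 10 1))))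
        = (fun i => (fun c => !(args.any (fun num => decide (c ∈ PySem.Int.toChars num))))
            (Char.ofNat (48 + i.toNat))) i := by
    intro i hi
    have h2 : decide (i ∈ PySem.List.pyRange 0 10 1) = true :=
      decide_eq_true (hr ▸ hi)
    have hfun : (fun num => !(PySem.Str.isIn (PySem.Int.toStr i) (PySem.Int.toStr num)
          && decide (i ∈ PySem.List.pyRange 0 10 1)))
        = fun num => !decide (Char.ofNat (48 + i.toNat) ∈ PySem.Int.toChars num) := by
      funext num
      rw [h2, Bool.and_true]
      have : PySem.Str.isIn (PySem.Int.toStr i) (PySem.Int.toStr num)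
          = PySem.Chars.isIn (PySem.Int.toChars i) (PySem.Int.toChars num) := by
        simp
      rw [this, hchar i hi, isIn_singleton]
    rw [hfun]
    exact all_not_eq_not_any args _
  rw [List.filter_congr hApred,
    flatMap_filter (fun i => Char.ofNat (48 + i.toNat))
      (fun c => !(args.any (fun num => decide (c ∈ PySem.Int.toChars num)))) _ hchar]
  have hmap : (([0,1,2,3,4,5,6,7,8,9] : List Int).map (fun i => Char.ofNat (48 + i.toNat)))
      = "0123456789".toList := by decide
  rw [hmap]
  simp

-- B's characters are the same filter
lemma B_chars (args : List Int) :
    (unused_digits_v1_alt args).toList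
      = "0123456789".toList.filter
          (fun c => !(args.any (fun num => decide (c ∈ PySem.Int.toChars num)))) := by
  unfold unused_digits_v1_alt
  have hBpred : ∀ d ∈ "0123456789".toList,
      (!(PySem.Set.contains
          (args.foldl (fun seen num =>
              (PySem.Int.toStr num).toList.foldl (fun seen ch =>
                if PySem.Chars.isIn [ch] "0123456789".toList then PySem.Set.add seen ch else seen)
                seen)
            PySem.Set.empty)
          d))
        = !(args.any (fun num => decide (d ∈ PySem.Int.toChars num))) := by
    intro d hd
    have hms := mem_seen "0123456789".toList d args PySem.Set.empty
    by_cases hA : (args.any (fun num => decide (d ∈ PySem.Int.toChars num))) = true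
    · have hm : d ∈ _ := hms.mpr (Or.inr ⟨hd, hA⟩)
      rw [(PySem.Set.contains_iff _ _).mpr hm, hA]
    · have hnm : d ∉ _ := fun hm => by
        rcases hms.mp hm with h | ⟨_, h⟩
        · simp [PySem.Set.empty] at h
        · exact hA h
      rw [Bool.eq_false_iff.mpr (fun hc => hnm ((PySem.Set.contains_iff _ _).mp hc)),
        Bool.eq_false_iff.mpr hA]
  rw [List.filter_congr hBpred]
  simp

-- ===== VERDICT (by name: the statement is the Claim_ definition above) =====
theorem unused_digits_v1_spec : Claim_equal_unused_digits_v1 := by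
  unfold Claim_equal_unused_digits_v1
  intro args _
  unfold Spec_unused_digits_v1
  exact String.toList_inj.mp ((A_chars args).trans (B_chars args).symm)
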